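-- pv_equiv track=rewrite | github.com/pigpgw/Algorithm | 백준/Gold/8983. 사냥꾼/사냥꾼.py | count_animal
-- ===== SOURCE A (Python) =====
-- def count_animal(sadae_list,animal_list,gun_range):
--     전체_죽은_고라니 = 0
--
--     for 고라니 in animal_list:
--         고라니_x,고라니_y = 고라니
--         left = 0
--         right = len(sadae_list) - 1
--         고라니죽었니 = False
--
--         while left <= right:
--             mid = (left + right) // 2
--             사대 = sadae_list[mid]
--             고라니_죽는_범위 = abs(사대 - 고라니_x) + 고라니_y
--
--             if 고라니_죽는_범위 <= gun_range:
--                 고라니죽었니 = True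
--                 break
--             elif 사대 < 고라니_x:
--                 left = mid + 1
--             else:
--                 right = mid - 1
--         if 고라니죽었니:
--             전체_죽은_고라니 += 1
--     return 전체_죽은_고라니
-- ===== SOURCE B (Python) =====
-- def count_animal(sadae_list, animal_list, gun_range):
--     return sum(1 for x, y in animal_list
--                if any(abs(s - x) + y <= gun_range for s in sadae_list))
-- ===== Notes on version B (the rewrite author's own statement) =====
-- stated objective: simpler
-- what changed: Replaces the hand-written binary search per animal with a one-line linear any() scan over all shooting positions, summed over the animals; Pre_ excludes unsorted position lists on which some animal is within range of some position (the problem guarantees sorted positions; there A's binary-search probe path returns an accidental value).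
-- outside the precondition, e.g. on count_animal([10, 0], [(0, 0)], 0): A returns 0, B returns 1
import Mathlib
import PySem

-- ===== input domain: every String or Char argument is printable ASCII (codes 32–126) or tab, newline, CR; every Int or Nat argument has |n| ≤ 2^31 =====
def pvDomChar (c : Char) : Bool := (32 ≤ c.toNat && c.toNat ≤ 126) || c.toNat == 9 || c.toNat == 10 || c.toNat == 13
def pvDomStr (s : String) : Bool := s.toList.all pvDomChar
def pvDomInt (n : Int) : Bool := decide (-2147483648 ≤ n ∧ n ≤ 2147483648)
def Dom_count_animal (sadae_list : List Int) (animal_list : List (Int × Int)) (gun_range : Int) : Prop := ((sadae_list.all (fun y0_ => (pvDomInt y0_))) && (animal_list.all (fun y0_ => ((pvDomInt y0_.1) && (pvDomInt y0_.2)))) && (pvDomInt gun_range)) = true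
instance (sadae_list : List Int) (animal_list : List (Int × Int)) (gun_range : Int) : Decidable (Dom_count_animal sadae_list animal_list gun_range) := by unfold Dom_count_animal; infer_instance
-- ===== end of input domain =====

-- B replaces A's per-animal binary search with a plain linear any-scan over the positions (simpler).

-- ===== PORT A =====
-- the while-loop of A; sadae_list[mid] is ported with pyGetD (the default is unreachable:
-- whenever the loop runs 0 ≤ left ≤ mid ≤ right < len, exactly as in the Python)
def huntLoop (sadae : List Int) (x y r : Int) (left right : Int) : Bool :=
  if h : left ≤ right then
    let mid := PySem.Int.floordiv (left + right) 2
    let s := PySem.List.pyGetD sadae mid 0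
    if |s - x| + y ≤ r then true
    else if s < x then huntLoop sadae x y r (mid + 1) right
    else huntLoop sadae x y r left (mid - 1)
  else false
termination_by (right + 1 - left).toNat
decreasing_by
  · have := PySem.Int.floordiv_two_mid_bounds h; omega
  · have := PySem.Int.floordiv_two_mid_bounds h; omega

def count_animal (sadae_list : List Int) (animal_list : List (Int × Int)) (gun_range : Int) : Int :=
  animal_list.foldl
    (fun acc a =>
      if huntLoop sadae_list a.1 a.2 gun_range 0 ((sadae_list.length : Int) - 1) then acc + 1 else acc)
    0

-- ===== PORT B =====
def count_animal_alt (sadae_list : List Int) (animal_list : List (Int × Int)) (gun_range : Int) : Int :=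
  ((animal_list.filter
      (fun a => sadae_list.any (fun s => decide (|s - a.1| + a.2 ≤ gun_range)))).length : Int)

-- ===== PRECONDITION & SPEC =====
-- Pre_ excludes unsorted shooting-position lists on which some animal is within range of some
-- position: the problem guarantees sorted positions, and on such unsorted input A's binary search
-- inspects only its probe path, returning an accidental value.
def Pre_count_animal (sadae_list : List Int) (animal_list : List (Int × Int)) (gun_range : Int) : Prop :=
  sadae_list.Pairwise (· ≤ ·) ∨
    ∀ a ∈ animal_list, ∀ s ∈ sadae_list, gun_range < |s - a.1| + a.2
instance (sadae_list : List Int) (animal_list : List (Int × Int)) (gun_range : Int) : Decidable (Pre_count_animal sadae_list animal_list gun_range) := by unfold Pre_count_animal; infer_instance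

def pvWitness_count_animal : List Int × (List (Int × Int)) × Int := ([1, 5, 9], [(2, 1), (100, 0)], 3)

def Spec_count_animal (sadae_list : List Int) (animal_list : List (Int × Int)) (gun_range : Int) (out : Int) : Prop := out = count_animal_alt sadae_list animal_list gun_range
instance (sadae_list : List Int) (animal_list : List (Int × Int)) (gun_range : Int) (out : Int) : Decidable (Spec_count_animal sadae_list animal_list gun_range out) := by unfold Spec_count_animal; infer_instance

-- ===== CLAIM (what is proved, stated in full; the proofs are below) =====
def Claim_equal_count_animal : Prop := ∀ (sadae_list : List Int) (animal_list : List (Int × Int)) (gun_range : Int), Dom_count_animal sadae_list animal_list gun_range → Pre_count_animal sadae_list animal_list gun_range → Spec_count_animal sadae_list animal_list gun_range (count_animal sadae_list animal_list gun_range)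

-- ===== LEMMAS AND PROOFS =====

lemma sorted_get_mono {l : List Int} (hs : l.Pairwise (· ≤ ·)) {i j : Nat}
    (hij : i ≤ j) (hj : j < l.length) : l[i]'(by omega) ≤ l[j] := by
  rcases Nat.lt_or_eq_of_le hij with h | h
  · exact (List.pairwise_iff_getElem.mp hs) i j _ hj h
  · subst h; rfl

lemma huntLoop_iff (sadae : List Int) (hs : sadae.Pairwise (· ≤ ·)) (x y r : Int) :
    ∀ n (left right : Int), (right + 1 - left).toNat ≤ n → 0 ≤ left →
      right ≤ (sadae.length : Int) - 1 →
      (huntLoop sadae x y r left right = true ↔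
        ∃ i : Nat, ∃ _ : i < sadae.length,
          left ≤ (i : Int) ∧ (i : Int) ≤ right ∧ |sadae[i] - x| + y ≤ r) := by
  intro n
  induction n with
  | zero =>
    intro left right hn h0 hr
    rw [huntLoop]
    have hlr : ¬ left ≤ right := by omega
    simp only [hlr, dif_neg, not_false_iff]
    constructor
    · intro h; exact absurd h (by simp)
    · rintro ⟨i, hi, h1, h2, _⟩; omega
  | succ n ih =>
    intro left right hn h0 hr
    rw [huntLoop]
    by_cases hlr : left ≤ right
    · have hmid := PySem.Int.floordiv_two_mid_bounds hlr
      set mid := PySem.Int.floordiv (left + right) 2 with hmiddef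
      have hmidlt : mid < (sadae.length : Int) := by omega
      have hmid0 : 0 ≤ mid := by omega
      have hget : PySem.List.pyGetD sadae mid 0 = sadae[mid.toNat]'(by omega) :=
        PySem.List.pyGetD_eq_getElem sadae 0 hmid0 (by omega)
      simp only [hlr, dif_pos, hget]
      by_cases hhit : |sadae[mid.toNat]'(by omega) - x| + y ≤ r
      · simp only [hhit, if_pos]
        constructor
        · intro _; exact ⟨mid.toNat, by omega, by omega, by omega, hhit⟩
        · intro _; trivial
      · rw [if_neg hhit]
        by_cases hlt : sadae[mid.toNat]'(by omega) < x
        · rw [if_pos hlt, ih (mid + 1) right (by omega) (by omega) hr]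
          constructor
          · rintro ⟨i, hi, h1, h2, h3⟩; exact ⟨i, hi, by omega, h2, h3⟩
          · rintro ⟨i, hi, h1, h2, h3⟩
            refine ⟨i, hi, ?_, h2, h3⟩
            by_contra hle
            -- i ≤ mid, so sadae[i] ≤ sadae[mid] < x and its distance is at least mid's
            have hmono : sadae[i] ≤ sadae[mid.toNat]'(by omega) :=
              sorted_get_mono hs (by omega) (by omega)
            have : |sadae[i] - x| ≥ |sadae[mid.toNat]'(by omega) - x| := by
              rw [abs_of_neg (by omega), abs_of_neg (by omega)]; omega
            exact hhit (by omega)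
        · rw [if_neg hlt, ih left (mid - 1) (by omega) h0 (by omega)]
          constructor
          · rintro ⟨i, hi, h1, h2, h3⟩; exact ⟨i, hi, h1, by omega, h3⟩
          · rintro ⟨i, hi, h1, h2, h3⟩
            refine ⟨i, hi, h1, ?_, h3⟩
            by_contra hle
            -- mid ≤ i, so sadae[i] ≥ sadae[mid] ≥ x and its distance is at least mid's
            have hmono : sadae[mid.toNat]'(by omega) ≤ sadae[i] :=
              sorted_get_mono hs (by omega) hi
            have : |sadae[i] - x| ≥ |sadae[mid.toNat]'(by omega) - x| := by
              rw [abs_of_nonneg (by omega), abs_of_nonneg (by omega)]; omega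
            exact hhit (by omega)
    · simp only [hlr, dif_neg, not_false_iff]
      constructor
      · intro h; exact absurd h (by simp)
      · rintro ⟨i, hi, h1, h2, _⟩; omega

lemma huntLoop_eq_any (sadae : List Int) (hs : sadae.Pairwise (· ≤ ·)) (x y r : Int) :
    huntLoop sadae x y r 0 ((sadae.length : Int) - 1)
      = sadae.any (fun s => decide (|s - x| + y ≤ r)) := by
  have hiff := huntLoop_iff sadae hs x y r ((sadae.length : Int) + 1 - 0).toNat 0
    ((sadae.length : Int) - 1) (by omega) (by omega) (by omega)
  rcases Bool.eq_false_or_eq_true (sadae.any (fun s => decide (|s - x| + y ≤ r))) with hA | hA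
  · rw [hA, hiff]
    rw [List.any_eq_true] at hA
    obtain ⟨s, hsmem, hsp⟩ := hA
    obtain ⟨i, hi, rfl⟩ := List.getElem_of_mem hsmem
    exact ⟨i, hi, by omega, by omega, by simpa using hsp⟩
  · rw [hA, ← Bool.not_eq_true, hiff]
    rintro ⟨i, hi, _, _, h3⟩
    rw [List.any_eq_false] at hA
    exact absurd (by simpa using h3) (by simpa using hA sadae[i] (List.getElem_mem hi))

-- if every probe would miss, the while-loop runs to exhaustion and returns false
lemma huntLoop_false_of_miss (sadae : List Int) (x y r : Int)
    (hmiss : ∀ s ∈ sadae, r < |s - x| + y) :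
    ∀ n (left right : Int), (right + 1 - left).toNat ≤ n → 0 ≤ left →
      right ≤ (sadae.length : Int) - 1 → huntLoop sadae x y r left right = false := by
  intro n
  induction n with
  | zero =>
    intro left right hn h0 hr
    rw [huntLoop]
    have hlr : ¬ left ≤ right := by omega
    simp [hlr]
  | succ n ih =>
    intro left right hn h0 hr
    rw [huntLoop]
    by_cases hlr : left ≤ right
    · have hmid := PySem.Int.floordiv_two_mid_bounds hlr
      set mid := PySem.Int.floordiv (left + right) 2 with hmiddef
      have hget : PySem.List.pyGetD sadae mid 0 = sadae[mid.toNat]'(by omega) :=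
        PySem.List.pyGetD_eq_getElem sadae 0 (by omega) (by omega)
      have hm : r < |sadae[mid.toNat]'(by omega) - x| + y :=
        hmiss _ (List.getElem_mem (by omega))
      simp only [hlr, dif_pos, hget]
      rw [if_neg (by omega)]
      split
      · exact ih (mid + 1) right (by omega) (by omega) hr
      · exact ih left (mid - 1) (by omega) h0 (by omega)
    · simp [hlr]

lemma count_foldl (sadae : List Int) (r : Int) (al0 : List (Int × Int))
    (heq : ∀ a ∈ al0, huntLoop sadae a.1 a.2 r 0 ((sadae.length : Int) - 1)
      = sadae.any (fun s => decide (|s - a.1| + a.2 ≤ r))) :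
    ∀ (al : List (Int × Int)), (∀ a ∈ al, a ∈ al0) → ∀ (acc : Int),
      al.foldl (fun acc a =>
        if huntLoop sadae a.1 a.2 r 0 ((sadae.length : Int) - 1) then acc + 1 else acc) acc
      = acc + ((al.filter
          (fun a => sadae.any (fun s => decide (|s - a.1| + a.2 ≤ r)))).length : Int) := by
  intro al
  induction al with
  | nil => intro _ acc; simp
  | cons a al ih =>
    intro hsub acc
    have ih := ih (fun b hb => hsub b (List.mem_cons_of_mem a hb))
    simp only [List.foldl_cons, List.filter_cons]
    rw [heq a (hsub a List.mem_cons_self)]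
    by_cases h : sadae.any (fun s => decide (|s - a.1| + a.2 ≤ r)) = true
    · rw [if_pos h, ih, h]; simp; omega
    · rw [if_neg h, ih]
      simp only [Bool.not_eq_true] at h
      rw [h]; simp

-- ===== VERDICT (by name: the statement is the Claim_ definition above) =====
theorem count_animal_spec : Claim_equal_count_animal := by
  intro sadae al r _ hpre
  unfold Spec_count_animal count_animal count_animal_alt
  have heq : ∀ a ∈ al, huntLoop sadae a.1 a.2 r 0 ((sadae.length : Int) - 1)
      = sadae.any (fun s => decide (|s - a.1| + a.2 ≤ r)) := by
    rcases hpre with hs | hmiss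
    · exact fun a _ => huntLoop_eq_any sadae hs a.1 a.2 r
    · intro a ha
      have h1 : huntLoop sadae a.1 a.2 r 0 ((sadae.length : Int) - 1) = false :=
        huntLoop_false_of_miss sadae a.1 a.2 r (hmiss a ha)
          ((sadae.length : Int) + 1 - 0).toNat 0 _ (by omega) (by omega) (by omega)
      have h2 : sadae.any (fun s => decide (|s - a.1| + a.2 ≤ r)) = false := by
        rw [List.any_eq_false]
        intro s hsmem
        have := hmiss a ha s hsmem
        simpa using by omega
      rw [h1, h2]
  rw [count_foldl sadae r al heq al (fun _ h => h) 0]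
  simp
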